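-- pv_equiv track=rewrite | github.com/nick-warfield/school-stuff | COMP-482/hw4/A-10.1.py | guard_paintings
-- ===== SOURCE A (Python) =====
-- def guard_paintings(hall):
--     guards = []
--     for x, painting in enumerate(hall):
--         if guards == []:
--             guards.append(x + 1)
--         elif guards[-1] != x - 1 and guards[-1] != x:
--             guards.append(x + 1)
--     return guards
-- ===== SOURCE B (Python) =====
-- def guard_paintings(hall):
--     # closed form: A places a guard at index 0 and every 3rd index after it
--     return [i + 1 for i in range(0, len(hall), 3)]
-- ===== Notes on version B (the rewrite author's own statement) =====
-- stated objective: simpler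
-- what changed: Replaces the stateful greedy loop over enumerate(hall) with the closed form [i+1 for i in range(0, len(hall), 3)], since the loop places a guard at index 0 and then every 3rd index regardless of painting values.
import Mathlib
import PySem

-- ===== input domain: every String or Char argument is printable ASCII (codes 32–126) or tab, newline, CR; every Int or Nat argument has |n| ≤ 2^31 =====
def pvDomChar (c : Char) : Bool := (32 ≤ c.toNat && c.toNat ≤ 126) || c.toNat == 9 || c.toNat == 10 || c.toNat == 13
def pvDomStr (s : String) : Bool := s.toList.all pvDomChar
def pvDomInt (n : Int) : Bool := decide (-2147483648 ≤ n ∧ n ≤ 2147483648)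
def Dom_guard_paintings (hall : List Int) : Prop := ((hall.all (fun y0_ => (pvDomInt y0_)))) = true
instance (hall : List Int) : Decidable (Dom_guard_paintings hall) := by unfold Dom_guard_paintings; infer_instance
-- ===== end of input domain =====

-- B replaces A's stateful greedy loop with the closed form: a guard at index 0 and every 3rd index after.
-- ===== PORT A =====
-- loop body of A: guards starts []; appends x+1 when guards == [] or guards[-1] differs from both x-1 and x
def guardStep (guards : List Int) (xp : Int × Int) : List Int :=
  if guards = [] then guards ++ [xp.1 + 1]
  else if PySem.List.pyGetD guards (-1) 0 ≠ xp.1 - 1 ∧ PySem.List.pyGetD guards (-1) 0 ≠ xp.1 then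
    guards ++ [xp.1 + 1]
  else guards

def guard_paintings (hall : List Int) : List Int :=
  (PySem.List.enumerate hall 0).foldl guardStep []

-- ===== PORT B =====
def guard_paintings_alt (hall : List Int) : List Int :=
  (PySem.List.pyRange 0 (hall.length : Int) 3).map (fun i => i + 1)

-- ===== PRECONDITION & SPEC =====
def Spec_guard_paintings (hall : List Int) (out : List Int) : Prop := out = guard_paintings_alt hall
instance (hall : List Int) (out : List Int) : Decidable (Spec_guard_paintings hall out) := by unfold Spec_guard_paintings; infer_instance

-- ===== CLAIM (what is proved, stated in full; the proofs are below) =====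
def Claim_equal_guard_paintings : Prop := ∀ (hall : List Int), Dom_guard_paintings hall → Spec_guard_paintings hall (guard_paintings hall)

-- ===== LEMMAS AND PROOFS =====

lemma pyRange3_nil (a b : Int) (h : b ≤ a) : PySem.List.pyRange a b 3 = [] := by
  rw [PySem.List.pyRange_of_pos a b (by norm_num)]
  rw [if_neg (by omega)]
  simp

lemma pyRange3_cons (a b : Int) (h : a < b) :
    PySem.List.pyRange a b 3 = a :: PySem.List.pyRange (a+3) b 3 := by
  rw [PySem.List.pyRange_of_pos a b (by norm_num), PySem.List.pyRange_of_pos (a+3) b (by norm_num)]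
  rw [if_pos h]
  have e1 : (if a + 3 < b then ((b - (a+3) + 3 - 1)/3).toNat else 0) = ((b - a - 1)/3).toNat := by
    split_ifs with h3
    · congr 1; omega
    · omega
  rw [e1]
  have e2 : ((b - a + 3 - 1)/3).toNat = ((b - a - 1)/3).toNat + 1 := by omega
  rw [e2, List.range_succ_eq_map]
  simp only [List.map_cons, List.map_map, Nat.cast_zero, mul_zero, add_zero]
  congr 1
  apply List.map_congr_left
  intro k _
  simp only [Function.comp_apply, Nat.succ_eq_add_one]
  push_cast
  ring

lemma pyGetD_neg_one_last (acc : List Int) (g : Int) (h : acc.getLast? = some g) :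
    PySem.List.pyGetD acc (-1) 0 = g := by
  have e : PySem.List.pyGetD acc (-1) 0 = (PySem.List.pyGet? acc (-1)).getD 0 := rfl
  rw [e, PySem.List.pyGet?_neg_one, h]
  rfl

lemma loop_inv (l : List Int) : ∀ (s g : Int) (acc : List Int),
    acc.getLast? = some g → g ≤ s → s ≤ g + 2 →
    (PySem.List.enumerate l s).foldl guardStep acc
      = acc ++ (PySem.List.pyRange (g + 2) (s + l.length) 3).map (fun i => i + 1) := by
  induction l with
  | nil =>
    intro s g acc hlast h1 h2
    rw [PySem.List.enumerate_nil]
    rw [List.foldl_nil]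
    have : PySem.List.pyRange (g+2) (s + (([] : List Int).length : Int)) 3 = [] := by
      apply pyRange3_nil; simp; omega
    rw [this]; simp
  | cons x t ih =>
    intro s g acc hlast h1 h2
    rw [PySem.List.enumerate_cons]
    simp only [List.foldl_cons]
    have hne : acc ≠ [] := by intro he; rw [he] at hlast; simp at hlast
    have hget : PySem.List.pyGetD acc (-1) 0 = g := pyGetD_neg_one_last acc g hlast
    by_cases hs : s = g + 2
    · -- append
      have hstep : guardStep acc (s, x) = acc ++ [s + 1] := by
        unfold guardStep
        rw [if_neg hne, hget, if_pos ⟨by omega, by omega⟩]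
      rw [hstep]
      have hlast' : (acc ++ [s+1]).getLast? = some (s+1) := by simp
      rw [ih (s+1) (s+1) (acc ++ [s+1]) hlast' (by omega) (by omega)]
      have e1 : (((x :: t).length : Nat) : Int) = (t.length : Int) + 1 := by simp
      rw [e1]
      have e2 : s + ((t.length : Int) + 1) = s + 1 + (t.length : Int) := by ring
      rw [e2]
      rw [pyRange3_cons (g+2) (s + 1 + (t.length : Int)) (by omega)]
      rw [List.map_cons]
      have e3 : g + 2 + 3 = s + 1 + 2 := by omega
      have e4 : g + 2 + 1 = s + 1 := by omega
      rw [e3, e4]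
      simp
    · -- skip (s = g or s = g + 1)
      have hstep : guardStep acc (s, x) = acc := by
        unfold guardStep
        rw [if_neg hne, hget, if_neg (by omega)]
      rw [hstep]
      rw [ih (s+1) g acc hlast (by omega) (by omega)]
      simp only [List.length_cons]
      push_cast
      ring_nf

-- ===== VERDICT (by name: the statement is the Claim_ definition above) =====
theorem guard_paintings_spec : Claim_equal_guard_paintings := by
  intro hall _
  unfold Spec_guard_paintings guard_paintings guard_paintings_alt
  cases hall with
  | nil => simp [PySem.List.enumerate_nil, pyRange3_nil 0 0 (by omega)]
  | cons h t =>
    rw [PySem.List.enumerate_cons]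
    simp only [List.foldl_cons]
    have hstep : guardStep [] (0, h) = [1] := by unfold guardStep; simp
    rw [hstep]
    simp only [zero_add]
    rw [loop_inv t 1 1 [1] (by simp) (by omega) (by omega)]
    have e1 : (((h :: t).length : Nat) : Int) = (t.length : Int) + 1 := by simp
    rw [e1]
    rw [pyRange3_cons 0 ((t.length : Int) + 1) (by omega)]
    rw [List.map_cons]
    have e2 : (0 : Int) + 3 = 3 := by norm_num
    have e3 : (0 : Int) + 1 = 1 := by norm_num
    have e4 : (t.length : Int) + 1 = 1 + (t.length : Int) := by ring
    rw [e2, e3, e4]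
    simp
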